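-- pv_equiv track=rewrite | github.com/Shubhankar759/neetcode-submissions-0rb4m1l3 | Data Structures & Algorithms/isomorphic-strings/submission-3.py | helper
-- ===== SOURCE A (Python) =====
-- def helper(s,t):
--     store = dict()
--     if len(s) != len(t):
--         return False
--     for i in range(len(s)):
--         if s[i] in store:
--             if store[s[i]] != t[i]:
--                 return False
--
--         else:
--             store[s[i]] =  t[i]
--
--     return True
-- ===== SOURCE B (Python) =====
-- def helper(s, t):
--     if len(s) != len(t):
--         return False
--     return len(set(zip(s, t))) == len(set(s))
-- ===== Notes on version B (the rewrite author's own statement) =====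
-- stated objective: simpler
-- what changed: Replaces the position-by-position loop with a dict and an early-exit conflict check by a set-cardinality identity: the mapping is consistent iff the number of distinct (s-char, t-char) pairs equals the number of distinct s-chars.
import Mathlib
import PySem

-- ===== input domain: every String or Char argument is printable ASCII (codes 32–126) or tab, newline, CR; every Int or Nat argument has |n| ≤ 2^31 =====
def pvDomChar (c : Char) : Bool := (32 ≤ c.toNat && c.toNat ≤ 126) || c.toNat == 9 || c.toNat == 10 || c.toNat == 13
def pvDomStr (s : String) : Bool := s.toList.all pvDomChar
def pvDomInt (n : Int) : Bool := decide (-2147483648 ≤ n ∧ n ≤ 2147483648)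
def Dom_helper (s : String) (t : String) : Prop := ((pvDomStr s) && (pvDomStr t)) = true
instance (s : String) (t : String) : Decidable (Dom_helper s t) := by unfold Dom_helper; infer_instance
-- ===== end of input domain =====

-- B replaces A's per-index loop with a dict and early exit by a set-cardinality identity
-- (|set(zip(s,t))| == |set(s)|); objective: simpler.


-- ===== PORT A =====
-- the 'for i in range(len(s))' loop with its early returns, as recursion over the index list;
-- s[i]/t[i] are ported with pyGetD (exact here: every index produced by the range is in range)
def helperLoop (ss ts : List Char) (store : PySem.Dict Char Char) : List Int → Bool
  | [] => true
  | i :: rest =>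
    match store.get? (PySem.List.pyGetD ss i ' ') with
    | some v =>
      if v ≠ PySem.List.pyGetD ts i ' ' then false
      else helperLoop ss ts store rest
    | none =>
      helperLoop ss ts (store.insert (PySem.List.pyGetD ss i ' ') (PySem.List.pyGetD ts i ' ')) rest

def helper (s : String) (t : String) : Bool :=
  if PySem.Str.len s ≠ PySem.Str.len t then false
  else helperLoop s.toList t.toList PySem.Dict.empty (PySem.List.pyRange 0 (PySem.Str.len s) 1)

-- ===== PORT B =====
def helper_alt (s : String) (t : String) : Bool :=
  if PySem.Str.len s ≠ PySem.Str.len t then false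
  else decide (PySem.Set.len (PySem.Set.ofList (s.toList.zip t.toList))
             = PySem.Set.len (PySem.Set.ofList s.toList))

-- ===== PRECONDITION & SPEC =====
def Spec_helper (s : String) (t : String) (out : Bool) : Prop := out = helper_alt s t
instance (s : String) (t : String) (out : Bool) : Decidable (Spec_helper s t out) := by unfold Spec_helper; infer_instance

-- ===== CLAIM (what is proved, stated in full; the proofs are below) =====
def Claim_equal_helper : Prop := ∀ (s : String) (t : String), Dom_helper s t → Spec_helper s t (helper s t)

-- ===== LEMMAS AND PROOFS =====

/-- the mapping is consistent: equal first components force equal second components -/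
def Cons (ps : List (Char × Char)) : Prop := ∀ p ∈ ps, ∀ q ∈ ps, p.1 = q.1 → p.2 = q.2

/-- the pairs are consistent with the dict built so far -/
def Compat (d : PySem.Dict Char Char) (ps : List (Char × Char)) : Prop :=
  ∀ p ∈ ps, ∀ v, d.get? p.1 = some v → v = p.2

theorem helperLoop_iff (ss ts : List Char) (hlen : ss.length = ts.length) :
    ∀ (k : Nat) (d : PySem.Dict Char Char), k ≤ ss.length →
    (helperLoop ss ts d (PySem.List.pyRange k ss.length 1) = true ↔
      Cons ((ss.drop k).zip (ts.drop k)) ∧ Compat d ((ss.drop k).zip (ts.drop k))) := by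
  intro k
  induction hn : ss.length - k generalizing k with
  | zero =>
    intro d hk
    have hk' : k = ss.length := by omega
    subst hk'
    rw [PySem.List.pyRange_one_eq_nil (by omega)]
    simp [helperLoop, Cons, Compat]
  | succ n ih =>
    intro d hk
    have hklt : k < ss.length := by omega
    have hklt' : k < ts.length := by omega
    rw [PySem.List.pyRange_one_cons (by exact_mod_cast hklt)]
    have hcast : ((k : Int) + 1) = ((k + 1 : Nat) : Int) := by push_cast; ring
    have hs : PySem.List.pyGetD ss (k : Int) ' ' = ss[k] := PySem.List.pyGetD_ofNat ss k ' ' hklt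
    have ht : PySem.List.pyGetD ts (k : Int) ' ' = ts[k] := PySem.List.pyGetD_ofNat ts k ' ' hklt'
    have hdrops : ss.drop k = ss[k] :: ss.drop (k + 1) := List.drop_eq_getElem_cons hklt
    have hdropt : ts.drop k = ts[k] :: ts.drop (k + 1) := List.drop_eq_getElem_cons hklt'
    have ihk := fun d => ih (k + 1) (by omega) d (by omega)
    rw [hdrops, hdropt, List.zip_cons_cons]
    show helperLoop ss ts d ((k : Int) :: PySem.List.pyRange ((k : Int) + 1) ss.length 1) = true ↔ _
    rw [helperLoop, hs, ht, hcast]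
    rcases hget : d.get? ss[k] with _ | v
    · -- none: insert into the dict and recurse
      dsimp only
      rw [ihk (d.insert ss[k] ts[k])]
      constructor
      · rintro ⟨hc, hcmp⟩
        refine ⟨?_, ?_⟩
        · rintro p hp q hq hpq
          rcases List.mem_cons.mp hp with rfl | hp <;>
            rcases List.mem_cons.mp hq with h | hq
          · rw [h]
          · -- head vs tail: q ∈ tail with q.1 = ss[k]
            refine (hcmp q hq ts[k] ?_)
            rw [← hpq]
            exact PySem.Dict.get?_insert_self ..
          · rcases List.mem_cons.mp hq with rfl | hq'
            · refine (hcmp p hp ts[k] ?_).symm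
              rw [hpq]
              exact PySem.Dict.get?_insert_self ..
            · exact hc p hp q hq' hpq
          · exact hc p hp q hq hpq
        · rintro p hp v hv
          rcases List.mem_cons.mp hp with rfl | hp
          · rw [hget] at hv; cases hv
          · by_cases hne : p.1 = ss[k]
            · rw [hne, hget] at hv; cases hv
            · refine hcmp p hp v ?_
              rw [PySem.Dict.get?_insert_of_ne d ts[k] hne]
              exact hv
      · rintro ⟨hc, hcmp⟩
        refine ⟨?_, ?_⟩
        · intro p hp q hq hpq
          exact hc p (List.mem_cons_of_mem _ hp) q (List.mem_cons_of_mem _ hq) hpq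
        · intro p hp v hv
          by_cases hne : p.1 = ss[k]
          · have hv' : v = ts[k] := by
              rw [hne, PySem.Dict.get?_insert_self] at hv
              exact (Option.some.inj hv).symm
            rw [hv']
            exact hc (ss[k], ts[k]) List.mem_cons_self p (List.mem_cons_of_mem _ hp) hne.symm
          · rw [PySem.Dict.get?_insert_of_ne d ts[k] hne] at hv
            exact hcmp p (List.mem_cons_of_mem _ hp) v hv
    · -- some v
      by_cases hv : v = ts[k]
      · subst hv
        dsimp only
        rw [if_neg (by simp), ihk d]
        constructor
        · rintro ⟨hc, hcmp⟩
          refine ⟨?_, ?_⟩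
          · rintro p hp q hq hpq
            have headval : ∀ r ∈ (ss.drop (k+1)).zip (ts.drop (k+1)), r.1 = ss[k] → r.2 = ts[k] := by
              intro r hr hr1
              exact (hcmp r hr ts[k] (by rw [hr1, hget])).symm
            rcases List.mem_cons.mp hp with rfl | hp <;>
              rcases List.mem_cons.mp hq with h | hq
            · rw [h]
            · exact (headval q hq hpq.symm).symm
            · rcases List.mem_cons.mp hq with rfl | hq'
              · exact headval p hp hpq
              · exact hc p hp q hq' hpq
            · exact hc p hp q hq hpq
          · rintro p hp w hw
            rcases List.mem_cons.mp hp with rfl | hp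
            · rw [hget] at hw; exact (Option.some.inj hw).symm
            · exact hcmp p hp w hw
        · rintro ⟨hc, hcmp⟩
          exact ⟨fun p hp q hq hpq =>
              hc p (List.mem_cons_of_mem _ hp) q (List.mem_cons_of_mem _ hq) hpq,
            fun p hp w hw => hcmp p (List.mem_cons_of_mem _ hp) w hw⟩
      · dsimp only
        rw [if_pos hv]
        simp only [Bool.false_eq_true, false_iff]
        rintro ⟨hc, hcmp⟩
        exact hv (hcmp (ss[k], ts[k]) List.mem_cons_self v hget)

theorem toFinset_ofList (xs : List (Char × Char)) :
    (PySem.Set.ofList xs).toFinset = xs.toFinset := by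
  ext x; simp [List.mem_toFinset, PySem.Set.mem_ofList]

theorem toFinset_ofList_char (xs : List Char) :
    (PySem.Set.ofList xs).toFinset = xs.toFinset := by
  ext x; simp [List.mem_toFinset, PySem.Set.mem_ofList]

theorem len_ofList_card (xs : List (Char × Char)) :
    (PySem.Set.ofList xs).length = xs.toFinset.card := by
  rw [← toFinset_ofList, List.toFinset_card_of_nodup (PySem.Set.nodup_ofList xs)]

theorem len_ofList_card_char (xs : List Char) :
    (PySem.Set.ofList xs).length = xs.toFinset.card := by
  rw [← toFinset_ofList_char, List.toFinset_card_of_nodup (PySem.Set.nodup_ofList xs)]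

theorem card_iff_cons (ss ts : List Char) (hlen : ss.length = ts.length) :
    ((ss.zip ts).toFinset.card = ss.toFinset.card) ↔ Cons (ss.zip ts) := by
  have hfst : (ss.zip ts).map Prod.fst = ss := List.map_fst_zip (le_of_eq hlen)
  have himg : ss.toFinset = (ss.zip ts).toFinset.image Prod.fst := by
    conv_lhs => rw [← hfst]
    ext x; simp
  rw [himg, eq_comm, Finset.card_image_iff]
  constructor
  · intro hinj p hp q hq hpq
    have := hinj (List.mem_toFinset.mpr hp) (List.mem_toFinset.mpr hq) hpq
    rw [this]
  · intro hc p hp q hq hpq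
    have hp' := List.mem_toFinset.mp hp
    have hq' := List.mem_toFinset.mp hq
    exact Prod.ext hpq (hc p hp' q hq' hpq)

-- ===== VERDICT (by name: the statement is the Claim_ definition above) =====
theorem helper_spec : Claim_equal_helper := by
  intro s t _
  unfold Spec_helper helper helper_alt
  by_cases hne : PySem.Str.len s ≠ PySem.Str.len t
  · rw [if_pos hne, if_pos hne]
  · rw [if_neg hne, if_neg hne]
    have hlen : s.toList.length = t.toList.length := by
      have := not_not.mp hne
      rw [PySem.Str.len_eq, PySem.Str.len_eq] at this
      exact_mod_cast this
    have hrange : PySem.List.pyRange 0 (PySem.Str.len s) 1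
        = PySem.List.pyRange ((0 : Nat) : Int) (s.toList.length : Int) 1 := by
      rw [PySem.Str.len_eq]; norm_num
    rw [hrange]
    have hloop := helperLoop_iff s.toList t.toList hlen 0 PySem.Dict.empty (Nat.zero_le _)
    simp only [List.drop_zero] at hloop
    have hcompat : Compat PySem.Dict.empty (s.toList.zip t.toList) := by
      intro p _ v hv
      rw [PySem.Dict.get?_empty] at hv; cases hv
    have hcard : (PySem.Set.len (PySem.Set.ofList (s.toList.zip t.toList))
        = PySem.Set.len (PySem.Set.ofList s.toList)) ↔ Cons (s.toList.zip t.toList) := by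
      show ((((PySem.Set.ofList (s.toList.zip t.toList)).length : Int))
          = ((PySem.Set.ofList s.toList).length : Int)) ↔ _
      rw [Int.natCast_inj, len_ofList_card, len_ofList_card_char]
      exact card_iff_cons _ _ hlen
    rw [Bool.eq_iff_iff, hloop, decide_eq_true_iff, hcard]
    exact ⟨fun h => h.1, fun h => ⟨h, hcompat⟩⟩
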